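-- pv_equiv track=rewrite | github.com/Ammyy9908/DSA | Arrays/minimum_difference_sum.py | minimum_difference_sum
-- ===== SOURCE A (Python) =====
-- def minimum_difference_sum(arr):
--     arr.sort()
--     result = 0
--     result += abs(arr[0] - arr[1])
--     result += abs(arr[len(arr) - 1] - arr[len(arr) - 2]);
--
--
--     for i in range(1, len(arr) - 1):
--         result += min(abs(arr[i] - arr[i - 1]),
--                   abs(arr[i] - arr[i + 1]))
--
--
--     return result
-- ===== SOURCE B (Python) =====
-- def minimum_difference_sum(arr):
--     arr.sort()
--     gaps = [b - a for a, b in zip(arr, arr[1:])]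
--     total = 0
--     for j, g in enumerate(gaps):
--         w = (j == 0) + (j == len(gaps) - 1)
--         if j + 1 < len(gaps) and g <= gaps[j + 1]:
--             w += 1
--         if j >= 1 and gaps[j - 1] > g:
--             w += 1
--         total += g * w
--     return total
-- ===== Notes on version B (the rewrite author's own statement) =====
-- stated objective: alternative
-- what changed: A loops over interior positions adding min of the two adjacent absolute differences; B instead iterates over the gaps of the sorted array and adds each gap times a weight counting the edge endpoints and the neighbour-comparison windows that gap wins, so no min and no abs are computed.
import Mathlib
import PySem

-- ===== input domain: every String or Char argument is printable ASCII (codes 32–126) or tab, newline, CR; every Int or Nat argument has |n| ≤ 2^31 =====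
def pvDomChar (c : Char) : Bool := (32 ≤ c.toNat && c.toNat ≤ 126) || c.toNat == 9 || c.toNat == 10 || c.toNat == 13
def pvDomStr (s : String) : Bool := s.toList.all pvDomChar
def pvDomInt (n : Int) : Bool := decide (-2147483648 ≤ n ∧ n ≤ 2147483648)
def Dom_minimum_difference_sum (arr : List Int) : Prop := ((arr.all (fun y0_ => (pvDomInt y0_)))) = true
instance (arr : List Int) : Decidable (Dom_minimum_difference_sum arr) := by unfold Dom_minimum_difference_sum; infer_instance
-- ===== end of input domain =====

-- B replaces A's per-window "min of the two adjacent absolute differences" loop by a per-gap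
-- weighted sum: each adjacent gap of the sorted array contributes its value times the number of
-- windows it wins (edges count once each).  Equivalence is about the return value; both A and
-- B sort arr in place; on lists shorter than 2, A raises IndexError while B returns 0.

-- ===== PORT A =====
def minimum_difference_sum (arr : List Int) : Int :=
  let s := PySem.List.sorted arr (fun x => x) false
  let result : Int := 0
  let result := result + |PySem.List.pyGetD s 0 0 - PySem.List.pyGetD s 1 0|
  let result := result + |PySem.List.pyGetD s ((s.length : Int) - 1) 0 - PySem.List.pyGetD s ((s.length : Int) - 2) 0|
  (PySem.List.pyRange 1 ((s.length : Int) - 1) 1).foldl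
    (fun result i =>
      result + min |PySem.List.pyGetD s i 0 - PySem.List.pyGetD s (i - 1) 0|
                   |PySem.List.pyGetD s i 0 - PySem.List.pyGetD s (i + 1) 0|)
    result

-- ===== PORT B =====
-- zip(arr, arr[1:]) is List.zip s (slice s 1 none); enumerate is PySem.List.enumerate.
def minimum_difference_sum_alt (arr : List Int) : Int :=
  let s := PySem.List.sorted arr (fun x => x) false
  let gaps := (List.zip s (PySem.List.slice s (some 1) none)).map (fun p => p.2 - p.1)
  (PySem.List.enumerate gaps).foldl
    (fun total jg =>
      let w : Int := (if jg.1 = 0 then 1 else 0) + (if jg.1 = (gaps.length : Int) - 1 then 1 else 0)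
      let w := if jg.1 + 1 < (gaps.length : Int) ∧ jg.2 ≤ PySem.List.pyGetD gaps (jg.1 + 1) 0 then w + 1 else w
      let w := if (1:Int) ≤ jg.1 ∧ jg.2 < PySem.List.pyGetD gaps (jg.1 - 1) 0 then w + 1 else w
      total + jg.2 * w) 0

-- ===== PRECONDITION & SPEC =====
-- Pre_ excludes lists of length < 2, on which A raises IndexError (B returns 0 there).
def Pre_minimum_difference_sum (arr : List Int) : Prop := 2 ≤ arr.length
instance (arr : List Int) : Decidable (Pre_minimum_difference_sum arr) := by unfold Pre_minimum_difference_sum; infer_instance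
def pvWitness_minimum_difference_sum : List Int := [3, 1, 7]

def Spec_minimum_difference_sum (arr : List Int) (out : Int) : Prop := out = minimum_difference_sum_alt arr
instance (arr : List Int) (out : Int) : Decidable (Spec_minimum_difference_sum arr out) := by unfold Spec_minimum_difference_sum; infer_instance

-- ===== CLAIM (what is proved, stated in full; the proofs are below) =====
def Claim_equal_minimum_difference_sum : Prop := ∀ (arr : List Int), Dom_minimum_difference_sum arr → Pre_minimum_difference_sum arr → Spec_minimum_difference_sum arr (minimum_difference_sum arr)

-- ===== LEMMAS AND PROOFS =====

-- on the sorted list, s[q] - s[p] with p ≤ q is nonnegative, so the abs drops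
lemma pv_abs_gap (arr s : List Int) (hs : s = PySem.List.sorted arr (fun x => x) false)
    (p q : Int) (hp : 0 ≤ p) (hpq : p ≤ q) (hq : q < (s.length : Int)) :
    |PySem.List.pyGetD s q 0 - PySem.List.pyGetD s p 0| =
    PySem.List.pyGetD s q 0 - PySem.List.pyGetD s p 0 := by
  rw [PySem.List.pyGetD_eq_getElem s 0 hp (by omega),
      PySem.List.pyGetD_eq_getElem s 0 (le_trans hp hpq) hq]
  subst hs
  have hmono := PySem.List.sorted_id_getElem_mono arr
    (p := p.toNat) (q := q.toNat) (by omega) (by omega)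
  exact abs_of_nonneg (by omega)

-- the nested-if weight of B split into four indicator terms
lemma pv_wsplit (g : Int) (c0 cL c1 c2 : Prop) [Decidable c0] [Decidable cL]
    [Decidable c1] [Decidable c2] :
    g * (if c2 then (if c1 then ((if c0 then (1:Int) else 0) + (if cL then 1 else 0)) + 1
                     else (if c0 then (1:Int) else 0) + (if cL then 1 else 0)) + 1
         else (if c1 then ((if c0 then (1:Int) else 0) + (if cL then 1 else 0)) + 1
               else (if c0 then (1:Int) else 0) + (if cL then 1 else 0))) =
    g * (if c0 then 1 else 0) + g * (if cL then 1 else 0) +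
      (g * (if c1 then 1 else 0) + g * (if c2 then 1 else 0)) := by
  split_ifs <;> ring

theorem minimum_difference_sum_spec : Claim_equal_minimum_difference_sum := by
  intro arr _ hpre
  unfold Pre_minimum_difference_sum at hpre
  unfold Spec_minimum_difference_sum minimum_difference_sum minimum_difference_sum_alt
  simp only []
  set s := PySem.List.sorted arr (fun x => x) false with hs
  have hlen : s.length = arr.length := PySem.List.length_sorted ..
  have hn : 2 ≤ s.length := by omega
  rw [PySem.List.slice_from_one]
  set gaps := (List.zip s s.tail).map (fun p : Int × Int => p.2 - p.1) with hg
  have hgl : gaps.length = s.length - 1 := by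
    simp only [hg, List.length_map, List.length_zip, List.length_tail]
    omega
  have hM : ((gaps.length : Nat) : Int) = (s.length : Int) - 1 := by omega
  -- each gap is the difference of consecutive sorted elements
  have hgap : ∀ j : Int, 0 ≤ j → j < (gaps.length : Int) →
      PySem.List.pyGetD gaps j 0 =
        PySem.List.pyGetD s (j + 1) 0 - PySem.List.pyGetD s j 0 := by
    intro j h0 h1
    rw [PySem.List.pyGetD_eq_getElem gaps 0 h0 h1,
        PySem.List.pyGetD_eq_getElem s 0 (by omega) (by omega),
        PySem.List.pyGetD_eq_getElem s 0 h0 (by omega)]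
    simp only [hg, List.getElem_map, List.getElem_zip, List.getElem_tail]
    simp only [show (j + 1).toNat = j.toNat + 1 from by omega]
  -- abbreviation for a gap read
  have habs : ∀ p q : Int, 0 ≤ p → p ≤ q → q < (s.length : Int) →
      |PySem.List.pyGetD s q 0 - PySem.List.pyGetD s p 0| =
      PySem.List.pyGetD s q 0 - PySem.List.pyGetD s p 0 := fun p q hp hpq hq =>
    pv_abs_gap arr s hs p q hp hpq hq
  -- ===== A's loop as a sum =====
  rw [PySem.List.foldl_add]
  -- ===== B as a sum over gap indices =====
  rw [PySem.List.enumerate_eq_map_pyRange (d := 0), List.foldl_map]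
  simp only [PySem.List.len_eq]
  rw [PySem.List.foldl_add]
  -- split the weight into four indicator terms
  rw [List.map_congr_left (l := PySem.List.pyRange 0 ((gaps.length : Int)) 1)
        (fun (j : Int) _ => pv_wsplit (PySem.List.pyGetD gaps j 0)
        (j = 0) (j = (gaps.length : Int) - 1)
        (j + 1 < (gaps.length : Int) ∧
          PySem.List.pyGetD gaps j 0 ≤ PySem.List.pyGetD gaps (j + 1) 0)
        ((1:Int) ≤ j ∧ PySem.List.pyGetD gaps j 0 < PySem.List.pyGetD gaps (j - 1) 0))]
  rw [PySem.List.sum_map_add_int, PySem.List.sum_map_add_int, PySem.List.sum_map_add_int]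
  -- the range split used by the "last index" terms
  have hrsplit : PySem.List.pyRange 0 ((gaps.length : Int)) 1 =
      PySem.List.pyRange 0 ((gaps.length : Int) - 1) 1 ++ [(gaps.length : Int) - 1] := by
    have h := PySem.List.pyRange_one_succ_right (a := 0) (b := (gaps.length : Int) - 1)
      (by omega)
    rw [show ((gaps.length : Int) - 1) + 1 = ((gaps.length : Nat) : Int) by ring] at h
    exact h
  have hrcons : PySem.List.pyRange 0 ((gaps.length : Int)) 1 =
      0 :: PySem.List.pyRange 1 ((gaps.length : Int)) 1 :=
    PySem.List.pyRange_one_cons (by omega)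
  -- S1: only j = 0 contributes
  have hS1 : ((PySem.List.pyRange 0 ((gaps.length : Int)) 1).map
      (fun j => PySem.List.pyGetD gaps j 0 * (if j = 0 then 1 else 0))).sum =
      PySem.List.pyGetD gaps 0 0 := by
    rw [hrcons, List.map_cons, List.sum_cons]
    have htail : (PySem.List.pyRange 1 ((gaps.length : Int)) 1).map
        (fun j => PySem.List.pyGetD gaps j 0 * (if j = 0 then 1 else 0)) =
        (PySem.List.pyRange 1 ((gaps.length : Int)) 1).map (fun _ => (0:Int)) :=
      List.map_congr_left (fun j hj => by
        rw [PySem.List.mem_pyRange_one] at hj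
        rw [if_neg (by omega), mul_zero])
    rw [htail]
    simp
  -- S2: only j = len-1 contributes
  have hS2 : ((PySem.List.pyRange 0 ((gaps.length : Int)) 1).map
      (fun j => PySem.List.pyGetD gaps j 0 *
        (if j = (gaps.length : Int) - 1 then 1 else 0))).sum =
      PySem.List.pyGetD gaps ((gaps.length : Int) - 1) 0 := by
    rw [hrsplit, List.map_append, List.sum_append]
    have hpre' : (PySem.List.pyRange 0 ((gaps.length : Int) - 1) 1).map
        (fun j => PySem.List.pyGetD gaps j 0 *
          (if j = (gaps.length : Int) - 1 then 1 else 0)) =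
        (PySem.List.pyRange 0 ((gaps.length : Int) - 1) 1).map (fun _ => (0:Int)) :=
      List.map_congr_left (fun j hj => by
        rw [PySem.List.mem_pyRange_one] at hj
        rw [if_neg (by omega), mul_zero])
    rw [hpre']
    simp
  -- S3: the last index drops out, and the bound conjunct holds on the rest
  have hS3 : ((PySem.List.pyRange 0 ((gaps.length : Int)) 1).map
      (fun j => PySem.List.pyGetD gaps j 0 *
        (if j + 1 < (gaps.length : Int) ∧
            PySem.List.pyGetD gaps j 0 ≤ PySem.List.pyGetD gaps (j + 1) 0
          then 1 else 0))).sum =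
      ((PySem.List.pyRange 0 ((gaps.length : Int) - 1) 1).map
        (fun j => PySem.List.pyGetD gaps j 0 *
          (if PySem.List.pyGetD gaps j 0 ≤ PySem.List.pyGetD gaps (j + 1) 0
            then 1 else 0))).sum := by
    rw [hrsplit, List.map_append, List.sum_append]
    have hpre' : (PySem.List.pyRange 0 ((gaps.length : Int) - 1) 1).map
        (fun j => PySem.List.pyGetD gaps j 0 *
          (if j + 1 < (gaps.length : Int) ∧
              PySem.List.pyGetD gaps j 0 ≤ PySem.List.pyGetD gaps (j + 1) 0
            then 1 else 0)) =
        (PySem.List.pyRange 0 ((gaps.length : Int) - 1) 1).map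
        (fun j => PySem.List.pyGetD gaps j 0 *
          (if PySem.List.pyGetD gaps j 0 ≤ PySem.List.pyGetD gaps (j + 1) 0
            then 1 else 0)) :=
      List.map_congr_left (fun j hj => by
        rw [PySem.List.mem_pyRange_one] at hj
        by_cases hc : PySem.List.pyGetD gaps j 0 ≤ PySem.List.pyGetD gaps (j + 1) 0
        · rw [if_pos ⟨by omega, hc⟩, if_pos hc]
        · rw [if_neg (fun h => hc h.2), if_neg hc])
    have hlast : (([(gaps.length : Int) - 1]).map
        (fun j => PySem.List.pyGetD gaps j 0 *
          (if j + 1 < (gaps.length : Int) ∧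
              PySem.List.pyGetD gaps j 0 ≤ PySem.List.pyGetD gaps (j + 1) 0
            then 1 else 0))).sum = 0 := by
      rw [List.map_singleton, List.sum_singleton,
          if_neg (fun h => absurd h.1 (by omega)), mul_zero]
    rw [hpre', hlast, add_zero]
  -- S4: index 0 drops out, and the 1 ≤ j conjunct holds on the rest
  have hS4 : ((PySem.List.pyRange 0 ((gaps.length : Int)) 1).map
      (fun j => PySem.List.pyGetD gaps j 0 *
        (if (1:Int) ≤ j ∧
            PySem.List.pyGetD gaps j 0 < PySem.List.pyGetD gaps (j - 1) 0
          then 1 else 0))).sum =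
      ((PySem.List.pyRange 1 ((gaps.length : Int)) 1).map
        (fun j => PySem.List.pyGetD gaps j 0 *
          (if PySem.List.pyGetD gaps j 0 < PySem.List.pyGetD gaps (j - 1) 0
            then 1 else 0))).sum := by
    rw [hrcons, List.map_cons, List.sum_cons,
        if_neg (fun h => absurd h.1 (by omega)), mul_zero, zero_add]
    have htail : (PySem.List.pyRange 1 ((gaps.length : Int)) 1).map
        (fun j => PySem.List.pyGetD gaps j 0 *
          (if (1:Int) ≤ j ∧
              PySem.List.pyGetD gaps j 0 < PySem.List.pyGetD gaps (j - 1) 0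
            then 1 else 0)) =
        (PySem.List.pyRange 1 ((gaps.length : Int)) 1).map
        (fun j => PySem.List.pyGetD gaps j 0 *
          (if PySem.List.pyGetD gaps j 0 < PySem.List.pyGetD gaps (j - 1) 0
            then 1 else 0)) :=
      List.map_congr_left (fun j hj => by
        rw [PySem.List.mem_pyRange_one] at hj
        by_cases hc : PySem.List.pyGetD gaps j 0 < PySem.List.pyGetD gaps (j - 1) 0
        · rw [if_pos ⟨by omega, hc⟩, if_pos hc]
        · rw [if_neg (fun h => hc h.2), if_neg hc])
    rw [htail]
  rw [hS1, hS2, hS3, hS4]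
  -- the two edge terms of A are the first and last gaps
  have he1 : |PySem.List.pyGetD s 0 0 - PySem.List.pyGetD s 1 0| =
      PySem.List.pyGetD gaps 0 0 := by
    rw [abs_sub_comm, habs 0 1 le_rfl (by omega) (by omega), hgap 0 le_rfl (by omega)]
    simp
  have he2 : |PySem.List.pyGetD s ((s.length : Int) - 1) 0 -
      PySem.List.pyGetD s ((s.length : Int) - 2) 0| =
      PySem.List.pyGetD gaps ((gaps.length : Int) - 1) 0 := by
    rw [habs ((s.length : Int) - 2) ((s.length : Int) - 1) (by omega) (by omega) (by omega),
        hgap ((gaps.length : Int) - 1) (by omega) (by omega)]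
    rw [show (gaps.length : Int) - 1 + 1 = (s.length : Int) - 1 by omega,
        show (gaps.length : Int) - 1 = (s.length : Int) - 2 by omega]
  rw [he1, he2]
  -- A's interior terms are mins of consecutive gaps
  rw [show PySem.List.pyRange 1 ((s.length : Int) - 1) 1 =
        PySem.List.pyRange 1 ((gaps.length : Int)) 1 from by rw [hM]]
  have hAmap : (PySem.List.pyRange 1 ((gaps.length : Int)) 1).map
      (fun i => min |PySem.List.pyGetD s i 0 - PySem.List.pyGetD s (i - 1) 0|
                    |PySem.List.pyGetD s i 0 - PySem.List.pyGetD s (i + 1) 0|) =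
      (PySem.List.pyRange 1 ((gaps.length : Int)) 1).map
      (fun i => min (PySem.List.pyGetD gaps (i - 1) 0) (PySem.List.pyGetD gaps i 0)) :=
    List.map_congr_left (fun i hi => by
      rw [PySem.List.mem_pyRange_one] at hi
      rw [habs (i - 1) i (by omega) (by omega) (by omega), abs_sub_comm,
          habs i (i + 1) (by omega) (by omega) (by omega),
          hgap (i - 1) (by omega) (by omega), hgap i (by omega) hi.2,
          show i - 1 + 1 = i by ring])
  rw [hAmap]
  -- ===== the interior sum equals the two comparison sums =====
  have hmain : ((PySem.List.pyRange 1 ((gaps.length : Int)) 1).map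
      (fun i => min (PySem.List.pyGetD gaps (i - 1) 0) (PySem.List.pyGetD gaps i 0))).sum =
      ((PySem.List.pyRange 0 ((gaps.length : Int) - 1) 1).map
        (fun j => PySem.List.pyGetD gaps j 0 *
          (if PySem.List.pyGetD gaps j 0 ≤ PySem.List.pyGetD gaps (j + 1) 0
            then 1 else 0))).sum +
      ((PySem.List.pyRange 1 ((gaps.length : Int)) 1).map
        (fun j => PySem.List.pyGetD gaps j 0 *
          (if PySem.List.pyGetD gaps j 0 < PySem.List.pyGetD gaps (j - 1) 0
            then 1 else 0))).sum := by
    rw [PySem.List.pyRange_one 0 ((gaps.length : Int) - 1),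
        PySem.List.pyRange_one 1 ((gaps.length : Int)),
        List.map_map, List.map_map, List.map_map,
        show ((gaps.length : Int) - 1 - 0) = ((gaps.length : Int) - 1) by ring,
        ← PySem.List.sum_map_add_int]
    apply congrArg
    apply List.map_congr_left
    intro k _
    simp only [Function.comp_apply, zero_add]
    rw [show (1:Int) + (k : Int) - 1 = (k : Int) by ring,
        show (1:Int) + (k : Int) = (k : Int) + 1 by ring, min_def]
    split_ifs <;> omega
  rw [hmain]
  ring
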